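-- pv_equiv track=rewrite | github.com/ramiluisto/SudokuSpeedTests | src/sudoku.py | find_first_unsolved
-- ===== SOURCE A (Python) =====
-- def find_first_unsolved(p_grid):
--     unsolved_idx = -1
--     for idx, possibilities in enumerate(p_grid):
--         if sum(possibilities) >= 2:
--             unsolved_idx = idx
--             break
--
--     if unsolved_idx != -1:
--         lowest_possible_values = [idx for idx, value in enumerate(p_grid[unsolved_idx]) if value == 1]
--     else:
--         lowest_possible_values = []
--
--
--     return unsolved_idx, lowest_possible_values
-- ===== SOURCE B (Python) =====
-- def find_first_unsolved(p_grid):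
--     unsolved = [(idx, [i for i, v in enumerate(cell) if v == 1])
--                 for idx, cell in enumerate(p_grid)
--                 if sum(cell) >= 2]
--     return unsolved[0] if unsolved else (-1, [])
-- ===== Notes on version B (the rewrite author's own statement) =====
-- stated objective: alternative
-- what changed: B has no search loop with break or index bookkeeping: a single comprehension builds (index, candidate-list) pairs for every unsolved cell, and the answer is the head of that list (or (-1, []) if it is empty), whereas A scans for the break index and then rescans p_grid[unsolved_idx].
import Mathlib
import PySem

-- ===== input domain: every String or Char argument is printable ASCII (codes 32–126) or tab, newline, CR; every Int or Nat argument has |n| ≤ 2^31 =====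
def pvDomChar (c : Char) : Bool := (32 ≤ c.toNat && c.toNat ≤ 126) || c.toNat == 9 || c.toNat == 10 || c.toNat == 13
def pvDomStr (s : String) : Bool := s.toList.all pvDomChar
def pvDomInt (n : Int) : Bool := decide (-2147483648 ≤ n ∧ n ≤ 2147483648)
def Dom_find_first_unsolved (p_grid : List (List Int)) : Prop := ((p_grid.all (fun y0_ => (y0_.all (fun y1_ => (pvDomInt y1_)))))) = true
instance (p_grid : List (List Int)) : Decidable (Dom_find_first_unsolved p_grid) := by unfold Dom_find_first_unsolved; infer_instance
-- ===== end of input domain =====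

-- B replaces A's break-loop + rescan with one comprehension over all unsolved cells whose head is the answer (alternative decomposition; same cost).


-- ===== PORT A =====
-- the 'for idx, possibilities in enumerate(p_grid): if sum >= 2: break' loop, carrying the running index
def ffuFindIdx : List (List Int) → Int → Int
  | [], _ => -1
  | c :: rest, i => if c.sum ≥ 2 then i else ffuFindIdx rest (i + 1)

-- '[idx for idx, value in enumerate(cell) if value == 1]'
def ffuOnes (cell : List Int) : List Int :=
  (PySem.List.enumerate cell 0).filterMap (fun p => if p.2 = 1 then some p.1 else none)

def find_first_unsolved (p_grid : List (List Int)) : Int × List Int :=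
  let unsolved_idx := ffuFindIdx p_grid 0
  let lowest_possible_values :=
    if unsolved_idx ≠ -1 then
      ffuOnes ((PySem.List.pyGet? p_grid unsolved_idx).getD [])   -- p_grid[unsolved_idx]; index is always in range here
    else []
  (unsolved_idx, lowest_possible_values)

-- ===== PORT B =====
-- the comprehension over all unsolved cells, then its head (or (-1, []))
def find_first_unsolved_alt (p_grid : List (List Int)) : Int × List Int :=
  let unsolved :=
    (PySem.List.enumerate p_grid 0).filterMap
      (fun p => if p.2.sum ≥ 2 then some (p.1, (PySem.List.enumerate p.2 0).filterMap (fun q => if q.2 = 1 then some q.1 else none)) else none)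
  match unsolved with
  | [] => (-1, [])
  | x :: _ => x

-- ===== PRECONDITION & SPEC =====
def Spec_find_first_unsolved (p_grid : List (List Int)) (out : Int × List Int) : Prop := out = find_first_unsolved_alt p_grid
instance (p_grid : List (List Int)) (out : Int × List Int) : Decidable (Spec_find_first_unsolved p_grid out) := by unfold Spec_find_first_unsolved; infer_instance

-- ===== CLAIM (what is proved, stated in full; the proofs are below) =====
def Claim_equal_find_first_unsolved : Prop := ∀ (p_grid : List (List Int)), Dom_find_first_unsolved p_grid → Spec_find_first_unsolved p_grid (find_first_unsolved p_grid)

-- ===== LEMMAS AND PROOFS =====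
theorem ffuFindIdx_ge (g : List (List Int)) (k : Nat) (h : ffuFindIdx g k ≠ -1) :
    (k : Int) ≤ ffuFindIdx g k := by
  induction g generalizing k with
  | nil => simp [ffuFindIdx] at h
  | cons c rest ih =>
      by_cases hc : c.sum ≥ 2
      · simp [ffuFindIdx, hc]
      · simp only [ffuFindIdx, hc, if_false,
          show ((k : Int) + 1) = ((k + 1 : Nat) : Int) by push_cast; ring] at h ⊢
        have := ih (k + 1) h
        push_cast at this ⊢
        omega

theorem ffuAlt_eq (g : List (List Int)) (k : Nat) :
    (match (PySem.List.enumerate g (k : Int)).filterMap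
        (fun p => if p.2.sum ≥ 2 then some (p.1, (PySem.List.enumerate p.2 0).filterMap (fun q => if q.2 = 1 then some q.1 else none)) else none) with
     | [] => ((-1 : Int), ([] : List Int))
     | x :: _ => x) =
      (ffuFindIdx g k,
        if ffuFindIdx g k ≠ -1 then
          ffuOnes ((PySem.List.pyGet? g (ffuFindIdx g k - k)).getD [])
        else []) := by
  induction g generalizing k with
  | nil => simp [PySem.List.enumerate_nil, ffuFindIdx]
  | cons c rest ih =>
      rw [PySem.List.enumerate_cons]
      by_cases hc : c.sum ≥ 2
      · have : (k : Int) ≠ -1 := by omega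
        simp [List.filterMap, hc, ffuFindIdx, this, sub_self,
          PySem.List.pyGet?_zero_cons, ffuOnes]
      · simp only [List.filterMap_cons, hc, if_false, ffuFindIdx,
          show ((k : Int) + 1) = ((k + 1 : Nat) : Int) by push_cast; ring]
        rw [ih (k + 1)]
        by_cases hne : ffuFindIdx rest (k + 1) = -1
        · simp [hne]
        · have hge := ffuFindIdx_ge rest (k + 1) hne
          simp only [ne_eq]
          congr 1
          have h1 : ffuFindIdx rest ((k + 1 : Nat) : Int) - (k : Int) =
              (ffuFindIdx rest ((k + 1 : Nat) : Int) - ((k + 1 : Nat) : Int)) + 1 := by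
            push_cast; ring
          rw [h1]
          set m := ffuFindIdx rest ((k + 1 : Nat) : Int) - ((k + 1 : Nat) : Int) with hm
          have hm0 : 0 ≤ m := by push_cast [hm] at hge ⊢; omega
          obtain ⟨n, hn⟩ := Int.eq_ofNat_of_zero_le hm0
          rw [hn, PySem.List.pyGet?_cons_succ]

-- ===== VERDICT (by name: the statement is the Claim_ definition above) =====
theorem find_first_unsolved_spec : Claim_equal_find_first_unsolved := by
  intro g _
  have h := ffuAlt_eq g 0
  simp only [Nat.cast_zero, sub_zero] at h
  simp [Spec_find_first_unsolved, find_first_unsolved, find_first_unsolved_alt, h]
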